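-- pv_equiv track=rewrite | github.com/darcy5/Bit_By_Bit_HACKATHON_2025 | Problem1_HACKATHON/CPA_attack.py | simulate_intermediate
-- ===== SOURCE A (Python) =====
-- RSA_N = 64507
--
-- def simulate_intermediate(ct, key_bits, bit_pos, hypothesis):
--     """
--     Simulating intermediate modular exponentiation value up to current bit
--     Using Python int to avoid overflow
--     """
--     val = 1
--     ct = int(ct)
--     for i in range(bit_pos + 1):
--         bit = key_bits[i] if i < bit_pos else hypothesis
--         val = (val * val) % RSA_N   # Square always
--         if bit == 1:
--             val = (val * ct) % RSA_N
--     return val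
-- ===== SOURCE B (Python) =====
-- RSA_N = 64507
--
-- def simulate_intermediate(ct, key_bits, bit_pos, hypothesis):
--     ct = int(ct)
--     if bit_pos < 0:
--         return 1
--     bits = list(key_bits[:bit_pos]) + [hypothesis]
--     e = 0
--     w = 1
--     for b in reversed(bits):
--         if b == 1:
--             e += w
--         w *= 2
--     return pow(ct, e, RSA_N)
-- ===== Notes on version B (the rewrite author's own statement) =====
-- stated objective: alternative
-- what changed: B replaces A's index-driven left-to-right square-and-multiply loop by materialising the bit list (slice plus hypothesis), scanning it in REVERSE with a running power-of-two weight to build the plain exponent, and finishing with a single built-in pow(ct, e, RSA_N) call.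
import Mathlib
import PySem

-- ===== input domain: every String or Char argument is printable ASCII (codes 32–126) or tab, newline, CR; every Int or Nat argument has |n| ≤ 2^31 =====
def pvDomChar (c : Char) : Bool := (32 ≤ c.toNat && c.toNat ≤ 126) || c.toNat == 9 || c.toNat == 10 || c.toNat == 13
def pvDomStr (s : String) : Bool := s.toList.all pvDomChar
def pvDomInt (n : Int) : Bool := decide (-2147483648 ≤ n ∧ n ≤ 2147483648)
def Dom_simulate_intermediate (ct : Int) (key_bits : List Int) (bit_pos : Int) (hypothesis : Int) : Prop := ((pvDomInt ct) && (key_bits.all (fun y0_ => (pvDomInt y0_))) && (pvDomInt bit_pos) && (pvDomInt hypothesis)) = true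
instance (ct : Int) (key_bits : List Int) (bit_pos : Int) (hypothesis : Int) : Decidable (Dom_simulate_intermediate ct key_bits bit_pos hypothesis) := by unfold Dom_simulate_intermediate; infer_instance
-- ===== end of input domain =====

-- B materialises the bit list (slice of key_bits plus the hypothesis bit), scans it in reverse with a running power-of-two weight to build the exponent, and returns one pow(ct, e, RSA_N) call instead of A's interleaved square-and-multiply; objective: alternative.

-- ===== PORT A =====
def simulate_intermediate (ct : Int) (key_bits : List Int) (bit_pos : Int) (hypothesis : Int) : Int :=
  (PySem.List.pyRange 0 (bit_pos + 1) 1).foldl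
    (fun val i =>
      let bit := if i < bit_pos then PySem.List.pyGetD key_bits i 0 else hypothesis
      let val := PySem.Int.mod (val * val) 64507
      if bit == 1 then PySem.Int.mod (val * ct) 64507 else val)
    1

-- ===== PORT B =====
def simulate_intermediate_alt (ct : Int) (key_bits : List Int) (bit_pos : Int) (hypothesis : Int) : Int :=
  if bit_pos < 0 then 1
  else
    let bits := PySem.List.slice key_bits none (some bit_pos) ++ [hypothesis]
    let ew := bits.reverse.foldl
      (fun (ew : Int × Int) b => ((if b == 1 then ew.1 + ew.2 else ew.1), ew.2 * 2))
      ((0 : Int), (1 : Int))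
    PySem.Int.powMod ct ew.1.toNat 64507

-- ===== PRECONDITION & SPEC =====
-- A raises IndexError (key_bits[i] with i < bit_pos out of range) exactly when bit_pos exceeds len(key_bits); Pre_ excludes those inputs.
def Pre_simulate_intermediate (ct : Int) (key_bits : List Int) (bit_pos : Int) (hypothesis : Int) : Prop :=
  bit_pos ≤ (key_bits.length : Int)
instance (ct : Int) (key_bits : List Int) (bit_pos : Int) (hypothesis : Int) : Decidable (Pre_simulate_intermediate ct key_bits bit_pos hypothesis) := by unfold Pre_simulate_intermediate; infer_instance
def pvWitness_simulate_intermediate : Int × List Int × Int × Int := (3, [1, 0, 1], 2, 1)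
def Spec_simulate_intermediate (ct : Int) (key_bits : List Int) (bit_pos : Int) (hypothesis : Int) (out : Int) : Prop := out = simulate_intermediate_alt ct key_bits bit_pos hypothesis
instance (ct : Int) (key_bits : List Int) (bit_pos : Int) (hypothesis : Int) (out : Int) : Decidable (Spec_simulate_intermediate ct key_bits bit_pos hypothesis out) := by unfold Spec_simulate_intermediate; infer_instance

-- ===== CLAIM (what is proved, stated in full; the proofs are below) =====
def Claim_equal_simulate_intermediate : Prop := ∀ (ct : Int) (key_bits : List Int) (bit_pos : Int) (hypothesis : Int), Dom_simulate_intermediate ct key_bits bit_pos hypothesis → Pre_simulate_intermediate ct key_bits bit_pos hypothesis → Spec_simulate_intermediate ct key_bits bit_pos hypothesis (simulate_intermediate ct key_bits bit_pos hypothesis)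

-- ===== LEMMAS AND PROOFS =====

-- MSB-first Horner value of a bit list (proof-only helper).
def pvHorner (bs : List Bool) : Nat := bs.foldl (fun a b => a * 2 + (if b then 1 else 0)) 0

-- Python's % with the positive modulus 64507 is Int.emod.
theorem pv_pmod (x : Int) : PySem.Int.mod x 64507 = x % 64507 := by
  simp [PySem.Int.mod]
  rw [Int.fmod_eq_emod]
  norm_num

theorem pv_modeq_self (a : Int) : (a % 64507) % 64507 = a % 64507 :=
  Int.emod_emod_of_dvd a dvd_rfl

-- One square-and-multiply step equals raising to the doubled (plus bit) exponent.
theorem pv_step_eq (ct : Int) (e : Nat) (b : Bool) :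
    (if b then PySem.Int.mod (PySem.Int.mod (PySem.Int.mod (ct ^ e) 64507 * PySem.Int.mod (ct ^ e) 64507) 64507 * ct) 64507
     else PySem.Int.mod (PySem.Int.mod (ct ^ e) 64507 * PySem.Int.mod (ct ^ e) 64507) 64507)
    = PySem.Int.mod (ct ^ (e * 2 + (if b then 1 else 0))) 64507 := by
  have ha : (ct ^ e % 64507) ≡ ct ^ e [ZMOD (64507 : Int)] := pv_modeq_self (ct ^ e)
  have hy : (ct ^ e % 64507) * (ct ^ e % 64507) ≡ ct ^ e * ct ^ e [ZMOD (64507 : Int)] := ha.mul ha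
  cases b with
  | false =>
      simp only [pv_pmod]
      calc ((ct ^ e % 64507) * (ct ^ e % 64507)) % 64507
          = (ct ^ e * ct ^ e) % 64507 := hy
        _ = ct ^ (e * 2) % 64507 := by rw [show ct ^ e * ct ^ e = ct ^ (e * 2) by ring]
  | true =>
      simp only [if_true, pv_pmod]
      have hz : ((ct ^ e % 64507) * (ct ^ e % 64507)) % 64507 ≡ ct ^ e * ct ^ e [ZMOD (64507 : Int)] :=
        (Int.ModEq.symm (pv_modeq_self _)).symm.trans hy
      calc (((ct ^ e % 64507) * (ct ^ e % 64507)) % 64507 * ct) % 64507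
          = (ct ^ e * ct ^ e * ct) % 64507 := hz.mul_right ct
        _ = ct ^ (e * 2 + 1) % 64507 := by rw [show ct ^ e * ct ^ e * ct = ct ^ (e * 2 + 1) by ring]

-- Loop invariant: A's square-and-multiply fold from ct^e mod N computes ct^(binary extension of e) mod N.
theorem pv_sqmul (ct bit_pos hypothesis : Int) (key_bits : List Int) :
    ∀ (l : List Int) (e : Nat),
      l.foldl
        (fun val i =>
          let bit := if i < bit_pos then PySem.List.pyGetD key_bits i 0 else hypothesis
          let val := PySem.Int.mod (val * val) 64507
          if bit == 1 then PySem.Int.mod (val * ct) 64507 else val)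
        (PySem.Int.mod (ct ^ e) 64507)
      = PySem.Int.mod (ct ^ (l.foldl (fun a i => a * 2 + (if (if i < bit_pos then PySem.List.pyGetD key_bits i 0 else hypothesis) == 1 then 1 else 0)) e)) 64507 := by
  intro l
  induction l with
  | nil => intro e; rfl
  | cons i l ih =>
      intro e
      simp only [List.foldl_cons]
      rw [show
        (let bit := if i < bit_pos then PySem.List.pyGetD key_bits i 0 else hypothesis
         let val := PySem.Int.mod (PySem.Int.mod (ct ^ e) 64507 * PySem.Int.mod (ct ^ e) 64507) 64507
         if bit == 1 then PySem.Int.mod (val * ct) 64507 else val)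
        = PySem.Int.mod (ct ^ (e * 2 + (if (if i < bit_pos then PySem.List.pyGetD key_bits i 0 else hypothesis) == 1 then 1 else 0))) 64507
        from pv_step_eq ct e _]
      exact ih _

-- A's fold from 1 computes ct^(Horner exponent over its index list) mod N.
theorem pv_sqmul0 (ct bit_pos hypothesis : Int) (key_bits : List Int) (l : List Int) :
    l.foldl
      (fun val i =>
        let bit := if i < bit_pos then PySem.List.pyGetD key_bits i 0 else hypothesis
        let val := PySem.Int.mod (val * val) 64507
        if bit == 1 then PySem.Int.mod (val * ct) 64507 else val)
      1
    = PySem.Int.mod (ct ^ (l.foldl (fun a i => a * 2 + (if (if i < bit_pos then PySem.List.pyGetD key_bits i 0 else hypothesis) == 1 then 1 else 0)) 0)) 64507 := by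
  have h := pv_sqmul ct bit_pos hypothesis key_bits l 0
  rw [pow_zero, show PySem.Int.mod (1 : Int) 64507 = (1 : Int) from by rw [pv_pmod]; norm_num] at h
  exact h

-- Horner fold with a general initial accumulator.
theorem pv_horner_init (bs : List Bool) : ∀ (a : Nat),
    bs.foldl (fun a b => a * 2 + (if b then 1 else 0)) a = a * 2 ^ bs.length + pvHorner bs := by
  induction bs with
  | nil => intro a; simp [pvHorner]
  | cons b t ih =>
      intro a
      simp only [List.foldl_cons, pvHorner, List.length_cons]
      rw [ih, ih ((0 : Nat) * 2 + (if b then 1 else 0))]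
      ring

-- B's reversed weight-accumulating pair fold computes (Horner value, 2^length).
theorem pv_pairfold (bs : List Bool) :
    bs.reverse.foldl (fun (ew : Int × Int) b => ((if b then ew.1 + ew.2 else ew.1), ew.2 * 2)) ((0 : Int), (1 : Int))
    = ((pvHorner bs : Int), (2 : Int) ^ bs.length) := by
  induction bs with
  | nil => simp [pvHorner]
  | cons b t ih =>
      have hh : pvHorner (b :: t) = (if b then 1 else 0) * 2 ^ t.length + pvHorner t := by
        have hu : pvHorner (b :: t) = t.foldl (fun a b => a * 2 + (if b then 1 else 0)) ((0 : Nat) * 2 + (if b then 1 else 0)) := rfl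
        rw [hu, pv_horner_init]
        ring
      rw [List.reverse_cons, List.foldl_append, ih, List.foldl_cons, List.foldl_nil, hh,
          List.length_cons, Prod.ext_iff]
      refine ⟨?_, by rw [pow_succ]⟩
      cases b <;> simp <;> ring

-- ===== VERDICT (by name: the statement is the Claim_ definition above) =====
theorem simulate_intermediate_spec : Claim_equal_simulate_intermediate := by
  intro ct key_bits bit_pos hypothesis _hdom hpre
  unfold Spec_simulate_intermediate simulate_intermediate simulate_intermediate_alt
  by_cases hneg : bit_pos < 0
  · rw [if_pos hneg, PySem.List.pyRange_one_eq_nil (by omega)]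
    rfl
  · have h0 : (0 : Int) ≤ bit_pos := by omega
    have hle : bit_pos ≤ (key_bits.length : Int) := hpre
    have hslice : PySem.List.slice key_bits none (some bit_pos) = key_bits.take bit_pos.toNat :=
      PySem.List.slice_to key_bits h0
    -- B's pair fold over Ints = pair fold over the Bool bit list
    have hmapfold :
        (key_bits.take bit_pos.toNat ++ [hypothesis]).reverse.foldl (fun (ew : Int × Int) b => ((if b == 1 then ew.1 + ew.2 else ew.1), ew.2 * 2)) ((0 : Int), (1 : Int))
        = (((key_bits.take bit_pos.toNat ++ [hypothesis]).map (· == 1)).reverse).foldl (fun (ew : Int × Int) b => ((if b then ew.1 + ew.2 else ew.1), ew.2 * 2)) ((0 : Int), (1 : Int)) := by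
      rw [← List.map_reverse, List.foldl_map]
    -- the two programs read the same bit sequence
    have hpredmap :
        (PySem.List.pyRange 0 (bit_pos + 1) 1).map (fun i => ((if i < bit_pos then PySem.List.pyGetD key_bits i 0 else hypothesis) == 1))
        = (key_bits.take bit_pos.toNat ++ [hypothesis]).map (· == 1) := by
      rw [PySem.List.pyRange_one_succ_right (by omega), List.map_append, List.map_append]
      congr 1
      · have hlen : (key_bits.take bit_pos.toNat).length = bit_pos.toNat := by
          rw [List.length_take]
          omega
        have hrange : PySem.List.pyRange 0 bit_pos 1 = PySem.List.pyRange 0 ((key_bits.take bit_pos.toNat).length : Int) 1 := by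
          rw [hlen]
          congr 1
          omega
        rw [List.map_congr_left (l := PySem.List.pyRange 0 bit_pos 1)
              (f := fun i => ((if i < bit_pos then PySem.List.pyGetD key_bits i 0 else hypothesis) == 1))
              (g := fun i => (PySem.List.pyGetD (key_bits.take bit_pos.toNat) i 0 == 1))
              (by
                intro i hi
                dsimp only
                rw [PySem.List.mem_pyRange_one] at hi
                obtain ⟨h1, h2⟩ := hi
                rw [if_pos h2]
                congr 1
                rw [PySem.List.pyGetD_eq_getElem key_bits (0 : Int) h1 (by omega),
                    PySem.List.pyGetD_eq_getElem (key_bits.take bit_pos.toNat) (0 : Int) h1 (by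
                      rw [List.length_take]; omega)]
                rw [List.getElem_take])]
        rw [hrange]
        conv_rhs => rw [← PySem.List.map_pyGetD_pyRange_zero (key_bits.take bit_pos.toNat) (0 : Int)]
        rw [List.map_map]
        rfl
      · simp only [List.map_cons, List.map_nil, lt_self_iff_false, if_false]
    rw [if_neg hneg, hslice]
    dsimp only
    rw [hmapfold, pv_pairfold, pv_sqmul0, ← hpredmap]
    dsimp only
    simp only [pvHorner]
    rw [List.foldl_map, Int.toNat_natCast]
    rfl
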